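-- pv_equiv track=rewrite | github.com/QwQ-maker/4box | 新改2/sbox_analysis_v2.py | sac_distance
-- ===== SOURCE A (Python) =====
-- def sbox_to_component_truth_tables(sbox, n, m):
--     size = 1 << n
--     components = []
--     for bit in range(m):
--         tt = [(sbox[x] >> (m - 1 - bit)) & 1 for x in range(size)]
--         components.append(tt)
--     return components
--
-- def sac_distance(sbox, n, m):
--     size = 1 << n
--     components = sbox_to_component_truth_tables(sbox, n, m)
--     distances = []
--     for tt in components:
--         max_dist = max(
--             abs(sum(1 for x in range(size) if tt[x] ^ tt[x ^ (1 << (n-1-bit))]) - (size >> 1))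
--             for bit in range(n)
--         )
--         distances.append(max_dist)
--     return distances
-- ===== SOURCE B (Python) =====
-- # SAC distance, restructured: bit-outer loop over whole-word derivatives sbox[x]^sbox[x^mask],
-- # counting per-component bit flips into an array and folding running maxima - no per-component truth tables.
-- def sac_distance(sbox, n, m):
--     size = 1 << n
--     half = size >> 1
--     if m <= 0:
--         return []
--     best = [0] * m
--     for bit in range(n):
--         mask = 1 << (n - 1 - bit)
--         cnt = [0] * m
--         for x in range(size):
--             d = sbox[x] ^ sbox[x ^ mask]
--             for b in range(m):
--                 if (d >> (m - 1 - b)) & 1: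
--                     cnt[b] += 1
--         for b in range(m):
--             dev = abs(cnt[b] - half)
--             if dev > best[b]:
--                 best[b] = dev
--     return best
-- ===== Notes on version B (the rewrite author's own statement) =====
-- stated objective: alternative
-- what changed: Flips the loop nesting (input-bit outer, output-component inner), replaces the per-component truth-table construction by whole-word derivatives sbox[x]^sbox[x^mask] whose output bits are counted into a per-component array, and maintains running maxima instead of max() over a generator.
import Mathlib
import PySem

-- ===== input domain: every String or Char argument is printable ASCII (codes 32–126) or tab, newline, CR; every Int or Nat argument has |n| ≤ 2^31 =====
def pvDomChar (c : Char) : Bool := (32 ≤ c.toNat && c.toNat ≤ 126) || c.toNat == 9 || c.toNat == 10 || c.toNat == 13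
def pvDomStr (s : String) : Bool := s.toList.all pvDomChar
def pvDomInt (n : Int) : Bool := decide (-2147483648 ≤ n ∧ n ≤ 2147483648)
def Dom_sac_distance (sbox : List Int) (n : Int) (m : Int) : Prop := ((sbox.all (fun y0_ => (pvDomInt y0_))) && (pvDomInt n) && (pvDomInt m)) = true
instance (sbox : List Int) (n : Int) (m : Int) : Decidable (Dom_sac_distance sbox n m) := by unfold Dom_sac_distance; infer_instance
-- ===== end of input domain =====

-- Header: B flips the loop nesting (input-bit outer, component inner), works on whole-word
-- derivatives sbox[x]^sbox[x^mask] counted into a per-component array with running maxima,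
-- instead of A's per-component truth tables with max() over a generator (objective: alternative).

-- ===== PORT A =====
-- helper = Python sbox_to_component_truth_tables
def pvComponentTT (sbox : List Int) (n : Int) (m : Int) : List (List Int) :=
  let size : Int := (1 : Int) <<< n.toNat
  (PySem.List.pyRange 0 m).foldl (fun components bit =>
    components ++ [(PySem.List.pyRange 0 size).map (fun x =>
      PySem.Int.band (PySem.List.pyGetD sbox x 0 >>> (m - 1 - bit).toNat) 1)]) []

def sac_distance (sbox : List Int) (n : Int) (m : Int) : List Int :=
  let size : Int := (1 : Int) <<< n.toNat
  let components := pvComponentTT sbox n m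
  components.foldl (fun distances tt =>
    distances ++ [(PySem.List.max? ((PySem.List.pyRange 0 n).map (fun bit =>
      |((PySem.List.pyRange 0 size).foldl (fun s x =>
          if PySem.Int.bxor (PySem.List.pyGetD tt x 0)
              (PySem.List.pyGetD tt (PySem.Int.bxor x ((1 : Int) <<< (n - 1 - bit).toNat)) 0) ≠ 0
          then s + 1 else s) 0) - (size >>> 1)|)) (fun v => v)).getD 0]) []

-- ===== PORT B =====
def sac_distance_alt (sbox : List Int) (n : Int) (m : Int) : List Int :=
  let size : Int := (1 : Int) <<< n.toNat
  let half : Int := size >>> 1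
  if m ≤ 0 then []
  else
    (PySem.List.pyRange 0 n).foldl (fun best bit =>
      let mask : Int := (1 : Int) <<< (n - 1 - bit).toNat
      let cnt := (PySem.List.pyRange 0 size).foldl (fun cnt x =>
        let d := PySem.Int.bxor (PySem.List.pyGetD sbox x 0)
                   (PySem.List.pyGetD sbox (PySem.Int.bxor x mask) 0)
        (PySem.List.pyRange 0 m).foldl (fun cnt b =>
          if PySem.Int.band (d >>> (m - 1 - b).toNat) 1 ≠ 0
          then cnt.set b.toNat (PySem.List.pyGetD cnt b 0 + 1) else cnt) cnt)
        (List.replicate m.toNat 0)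
      (PySem.List.pyRange 0 m).foldl (fun best b =>
        let dev := |PySem.List.pyGetD cnt b 0 - half|
        if PySem.List.pyGetD best b 0 < dev then best.set b.toNat dev else best) best)
      (List.replicate m.toNat 0)

-- ===== PRECONDITION & SPEC =====
-- Pre_ excludes exactly the inputs where Python A raises: n < 0 (ValueError from 1 << n),
-- and, when m ≥ 1, n = 0 (ValueError: max() of an empty generator) or 2^n > len(sbox) (IndexError).
def Pre_sac_distance (sbox : List Int) (n : Int) (m : Int) : Prop :=
  0 ≤ n ∧ (1 ≤ m → (1 ≤ n ∧ ((2 ^ n.toNat : Nat) : Int) ≤ sbox.length))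
instance (sbox : List Int) (n : Int) (m : Int) : Decidable (Pre_sac_distance sbox n m) := by
  unfold Pre_sac_distance; infer_instance

def pvWitness_sac_distance : List Int × Int × Int := ([3, 0, 2, 1], 2, 2)

def Spec_sac_distance (sbox : List Int) (n : Int) (m : Int) (out : List Int) : Prop :=
  out = sac_distance_alt sbox n m
instance (sbox : List Int) (n : Int) (m : Int) (out : List Int) : Decidable (Spec_sac_distance sbox n m out) := by
  unfold Spec_sac_distance; infer_instance

-- ===== CLAIM (what is proved, stated in full; the proofs are below) =====
def Claim_equal_sac_distance : Prop := ∀ (sbox : List Int) (n : Int) (m : Int),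
  Dom_sac_distance sbox n m → Pre_sac_distance sbox n m →
    Spec_sac_distance sbox n m (sac_distance sbox n m)

-- ===== LEMMAS AND PROOFS =====

-- Bit k of the infinite two's-complement representation of v (Python's (v >> k) & 1 as a Bool).
def pvItb (v : Int) (k : Nat) : Bool := if 0 ≤ v then v.toNat.testBit k else !((-v - 1).toNat.testBit k)

-- The common per-(component-bit k, mask) "derivative bit differs" predicate on x.
def pvD (sbox : List Int) (k : Nat) (mask x : Int) : Bool :=
  pvItb (PySem.List.pyGetD sbox x 0) k != pvItb (PySem.List.pyGetD sbox (PySem.Int.bxor x mask) 0) k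

def pvCnt (sbox : List Int) (N M bitn bn : Nat) : Int :=
  ((List.range (2 ^ N)).countP (fun (xn : Nat) => pvD sbox (M - 1 - bn) ((2 ^ (N - 1 - bitn) : Nat) : Int) (xn : Int)) : Int)

def pvDev (sbox : List Int) (N M bitn bn : Nat) : Int :=
  |pvCnt sbox N M bitn bn - ((2 ^ N >>> 1 : Nat) : Int)|

def pvVal (sbox : List Int) (N M : Nat) (bn : Nat) : Int :=
  (List.range N).foldl (fun a bitn => max a (pvDev sbox N M bitn bn)) 0

lemma pv_shl (j : Nat) : ((1 : Int) <<< j) = ((2 ^ j : Nat) : Int) := by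
  have h : ((1 : Int) <<< j) = (((1 <<< j : Nat) : Nat) : Int) := rfl
  rw [h]; norm_num [Nat.shiftLeft_eq]

lemma pv_itb_natCast (w : Nat) (k : Nat) : pvItb (w : Int) k = w.testBit k := by simp [pvItb]
lemma pv_itb_neg (w : Nat) (k : Nat) : pvItb (-(w : Int) - 1) k = !(w.testBit k) := by
  have h1 : ¬ (0 : Int) ≤ -(w : Int) - 1 := by omega
  have h2 : (-(-(w : Int) - 1) - 1).toNat = w := by omega
  unfold pvItb; rw [if_neg h1, h2]
lemma pv_band_shift (v : Int) (k : Nat) :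
    PySem.Int.band (v >>> k) 1 = if pvItb v k then 1 else 0 := by
  rw [PySem.Int.band_one, PySem.Int.mod_eq_emod_of_pos (by norm_num)]
  rcases (show 0 ≤ v ∨ v < 0 by omega) with hv | hv
  · obtain ⟨a, rfl⟩ := Int.eq_ofNat_of_zero_le hv
    have hsh : ((a : Int)) >>> k = ((a >>> k : Nat) : Int) := rfl
    rw [hsh, pv_itb_natCast, Nat.testBit_eq_decide_div_mod_eq, ← Nat.shiftRight_eq_div_pow]
    generalize a >>> k = w
    rcases Nat.mod_two_eq_zero_or_one w with h | h
    · have hd : (decide (w % 2 = 1)) = false := by simp [h]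
      rw [hd, if_neg (by simp)]; omega
    · have hd : (decide (w % 2 = 1)) = true := by simp [h]
      rw [hd, if_pos rfl]; omega
  · obtain ⟨a, rfl⟩ := Int.eq_negSucc_of_lt_zero hv
    have hsh : (Int.negSucc a) >>> k = Int.negSucc (a >>> k) := rfl
    have hne : Int.negSucc a = -(a : Int) - 1 := by rw [Int.negSucc_eq]; ring
    have hitb : pvItb (Int.negSucc a) k = !(a.testBit k) := by rw [hne, pv_itb_neg]
    rw [hsh, hitb, Nat.testBit_eq_decide_div_mod_eq, ← Nat.shiftRight_eq_div_pow, Int.negSucc_eq]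
    generalize a >>> k = w
    rcases Nat.mod_two_eq_zero_or_one w with h | h
    · have hd : (decide (w % 2 = 1)) = false := by simp [h]
      rw [hd]; simp only [Bool.not_false]; rw [if_pos trivial]; omega
    · have hd : (decide (w % 2 = 1)) = true := by simp [h]
      rw [hd]; simp only [Bool.not_true]; rw [if_neg (by simp)]; omega
lemma pv_itb_bxor (u v : Int) (k : Nat) :
    pvItb (PySem.Int.bxor u v) k = (pvItb u k != pvItb v k) := by
  rcases (show 0 ≤ u ∨ u < 0 by omega) with hu | hu <;> rcases (show 0 ≤ v ∨ v < 0 by omega) with hv | hv <;>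
    unfold PySem.Int.bxor <;>
    [rw [if_pos hu, if_pos hv]; rw [if_pos hu, if_neg (not_le.mpr hv)];
     rw [if_neg (not_le.mpr hu), if_pos hv]; rw [if_neg (not_le.mpr hu), if_neg (not_le.mpr hv)]]
  · rw [pv_itb_natCast, Nat.testBit_xor]
    have h1 : pvItb u k = u.toNat.testBit k := by simp [pvItb, hu]
    have h2 : pvItb v k = v.toNat.testBit k := by simp [pvItb, hv]
    simp only [h1, h2]
  · rw [pv_itb_neg, Nat.testBit_xor]
    have h1 : pvItb u k = u.toNat.testBit k := by simp [pvItb, hu]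
    have h2 : pvItb v k = !((-v - 1).toNat.testBit k) := by simp [pvItb, not_le.mpr hv]
    simp only [h1, h2]; all_goals (cases u.toNat.testBit k <;> cases (-v - 1).toNat.testBit k <;> rfl)
  · rw [pv_itb_neg, Nat.testBit_xor]
    have h1 : pvItb u k = !((-u - 1).toNat.testBit k) := by simp [pvItb, not_le.mpr hu]
    have h2 : pvItb v k = v.toNat.testBit k := by simp [pvItb, hv]
    simp only [h1, h2]; all_goals (cases (-u - 1).toNat.testBit k <;> cases v.toNat.testBit k <;> rfl)
  · rw [pv_itb_natCast, Nat.testBit_xor]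
    have h1 : pvItb u k = !((-u - 1).toNat.testBit k) := by simp [pvItb, not_le.mpr hu]
    have h2 : pvItb v k = !((-v - 1).toNat.testBit k) := by simp [pvItb, not_le.mpr hv]
    simp only [h1, h2]; all_goals (cases (-u - 1).toNat.testBit k <;> cases (-v - 1).toNat.testBit k <;> rfl)

lemma pv_condA (u v : Int) (k : Nat) :
    (PySem.Int.bxor (PySem.Int.band (u >>> k) 1) (PySem.Int.band (v >>> k) 1) ≠ 0)
      ↔ (pvItb u k != pvItb v k) = true := by
  rw [pv_band_shift, pv_band_shift]
  cases pvItb u k <;> cases pvItb v k <;> decide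

lemma pv_condB (u v : Int) (k : Nat) :
    (PySem.Int.band ((PySem.Int.bxor u v) >>> k) 1 ≠ 0) ↔ (pvItb u k != pvItb v k) = true := by
  rw [pv_band_shift, ← pv_itb_bxor]
  cases pvItb (PySem.Int.bxor u v) k <;> simp

lemma pvRange_natCast (M : Nat) :
    PySem.List.pyRange 0 (M : Int) = (List.range M).map (fun k : Nat => (k : Int)) := by
  simp [PySem.List.pyRange_one]

lemma pv_getD_set (c : List Int) (i j : Nat) (v : Int) :
    (c.set i v).getD j 0 = if i = j ∧ j < c.length then v else c.getD j 0 := by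
  simp only [List.getD_eq_getElem?_getD, List.getElem?_set]
  split_ifs <;> simp_all

lemma pv_foldl_len {α β : Type} (step : List α → β → List α)
    (h : ∀ c x, (step c x).length = c.length) :
    ∀ (l : List β) (c : List α), (l.foldl step c).length = c.length := by
  intro l; induction l with
  | nil => intro c; rfl
  | cons x xs ih => intro c; simp [List.foldl_cons, ih, h]

-- the inner b-loop: conditional +1 at each index
lemma pv_incrLoop (Q : Int → Prop) [DecidablePred Q] (M : Nat) :
    ∀ (c : List Int) (j : Nat),
      (((List.range M).foldl (fun c (b : Nat) =>
          if Q (b : Int) then c.set ((b : Int)).toNat (PySem.List.pyGetD c (b : Int) 0 + 1) else c) c)).getD j 0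
        = if j < M ∧ j < c.length ∧ Q (j : Int) then c.getD j 0 + 1 else c.getD j 0 := by
  induction M with
  | zero => intro c j; simp
  | succ M ih =>
    intro c j
    rw [List.range_succ, List.foldl_append, List.foldl_cons, List.foldl_nil]
    have hlen : ((List.range M).foldl (fun c (b : Nat) =>
        if Q (b : Int) then c.set ((b : Int)).toNat (PySem.List.pyGetD c (b : Int) 0 + 1) else c) c).length
        = c.length :=
      pv_foldl_len _ (fun c' b => by split_ifs <;> simp) _ _
    by_cases hQ : Q (M : Int)
    · rw [if_pos hQ, PySem.List.pyGetD_natCast, Int.toNat_natCast, pv_getD_set, hlen]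
      simp only [ih]
      by_cases hMj : M = j
      · subst hMj
        by_cases hl : M < c.length
        · rw [if_pos ⟨rfl, hl⟩, if_neg (by rintro ⟨h, -⟩; exact absurd h (lt_irrefl M)),
            if_pos ⟨M.lt_succ_self, hl, hQ⟩]
        · rw [if_neg (by tauto), if_neg (by rintro ⟨-, h, -⟩; exact hl h),
            if_neg (by rintro ⟨-, h, -⟩; exact hl h)]
      · rw [if_neg (fun h => hMj h.1)]
        by_cases h1 : j < M ∧ j < c.length ∧ Q (j : Int)
        · rw [if_pos h1, if_pos ⟨by omega, h1.2⟩]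
        · rw [if_neg h1, if_neg (by rintro ⟨hA, hB, hC⟩; exact h1 ⟨by omega, hB, hC⟩)]
    · rw [if_neg hQ]
      simp only [ih]
      by_cases h1 : j < M ∧ j < c.length ∧ Q (j : Int)
      · rw [if_pos h1, if_pos ⟨by omega, h1.2⟩]
      · rw [if_neg h1, if_neg (by
          rintro ⟨hA, hB, hC⟩
          rcases Nat.lt_succ_iff_lt_or_eq.mp hA with h | h
          · exact h1 ⟨h, hB, hC⟩
          · exact hQ (h ▸ hC))]


lemma pv_maxLoop (D : Int → Int) (M : Nat) :
    ∀ (c : List Int) (j : Nat),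
      ((List.range M).foldl (fun best (b : Nat) =>
          if PySem.List.pyGetD best (b : Int) 0 < D (b : Int)
          then best.set ((b : Int)).toNat (D (b : Int)) else best) c).getD j 0
        = if j < M ∧ j < c.length then max (c.getD j 0) (D (j : Int)) else c.getD j 0 := by
  induction M with
  | zero => intro c j; simp
  | succ M ih =>
    intro c j
    rw [List.range_succ, List.foldl_append, List.foldl_cons, List.foldl_nil]
    have hlen : ((List.range M).foldl (fun best (b : Nat) =>
        if PySem.List.pyGetD best (b : Int) 0 < D (b : Int)
        then best.set ((b : Int)).toNat (D (b : Int)) else best) c).length = c.length :=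
      pv_foldl_len _ (fun c' b => by split_ifs <;> simp) _ _
    rw [PySem.List.pyGetD_natCast, Int.toNat_natCast]
    have hcond : ((List.range M).foldl (fun best (b : Nat) =>
        if PySem.List.pyGetD best (b : Int) 0 < D (b : Int)
        then best.set ((b : Int)).toNat (D (b : Int)) else best) c).getD M 0 = c.getD M 0 := by
      rw [ih]; exact if_neg (by omega)
    rw [hcond]
    by_cases hlt : c.getD M 0 < D (M : Int)
    · rw [if_pos hlt, pv_getD_set, hlen, ih]
      by_cases hMj : M = j
      · subst hMj
        by_cases hl : M < c.length
        · rw [if_pos ⟨rfl, hl⟩, if_pos ⟨M.lt_succ_self, hl⟩]; omega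
        · rw [if_neg (fun h => hl h.2), if_neg (by rintro ⟨h, -⟩; exact absurd h (lt_irrefl M)),
            if_neg (fun h => hl h.2)]
      · rw [if_neg (fun h => hMj h.1)]
        by_cases h1 : j < M ∧ j < c.length
        · rw [if_pos h1, if_pos ⟨by omega, h1.2⟩]
        · rw [if_neg h1, if_neg (by rintro ⟨hA, hB⟩; exact h1 ⟨by omega, hB⟩)]
    · rw [if_neg hlt, ih]
      by_cases h1 : j < M ∧ j < c.length
      · rw [if_pos h1, if_pos ⟨by omega, h1.2⟩]
      · rw [if_neg h1]
        by_cases hMj : M = j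
        · subst hMj
          by_cases hl : M < c.length
          · rw [if_pos ⟨M.lt_succ_self, hl⟩]; omega
          · rw [if_neg (fun h => hl h.2)]
        · rw [if_neg (by rintro ⟨hA, hB⟩; exact h1 ⟨by omega, hB⟩)]

lemma pv_incr_len (Q : Int → Prop) [DecidablePred Q] (M : Nat) (c : List Int) :
    ((List.range M).foldl (fun c (b : Nat) =>
      if Q (b : Int) then c.set ((b : Int)).toNat (PySem.List.pyGetD c (b : Int) 0 + 1) else c) c).length
      = c.length :=
  pv_foldl_len _ (fun c' b => by split_ifs <;> simp) _ _

lemma pv_xLoop (Q : Int → Int → Prop) [∀ x b, Decidable (Q x b)] (M : Nat) :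
    ∀ (xs : List Int) (c : List Int) (j : Nat), j < M → j < c.length →
      ((xs.foldl (fun c x => (List.range M).foldl (fun c (b : Nat) =>
          if Q x (b : Int) then c.set ((b : Int)).toNat (PySem.List.pyGetD c (b : Int) 0 + 1) else c) c) c)).getD j 0
        = c.getD j 0 + ((xs.countP (fun x => decide (Q x (j : Int)))) : Int) := by
  intro xs
  induction xs with
  | nil => intro c j h1 h2; simp
  | cons x xs ih =>
    intro c j h1 h2
    rw [List.foldl_cons]
    have hlen := pv_incr_len (Q x) M c
    rw [ih _ j h1 (by omega)]
    rw [pv_incrLoop (Q x) M c j, List.countP_cons]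
    by_cases hq : Q x (j : Int)
    · rw [if_pos ⟨h1, h2, hq⟩]
      simp [hq]; ring
    · rw [if_neg (by rintro ⟨-, -, h⟩; exact hq h)]
      simp [hq]

lemma pv_max_len (D : Int → Int) (M : Nat) (c : List Int) :
    ((List.range M).foldl (fun best (b : Nat) =>
      if PySem.List.pyGetD best (b : Int) 0 < D (b : Int)
      then best.set ((b : Int)).toNat (D (b : Int)) else best) c).length = c.length :=
  pv_foldl_len _ (fun c' b => by split_ifs <;> simp) _ _

lemma pv_bitLoop (D : Int → Int → Int) (M : Nat) :
    ∀ (bits : List Int) (c : List Int) (j : Nat), j < M → j < c.length →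
      ((bits.foldl (fun best (bit : Int) => (List.range M).foldl (fun best (b : Nat) =>
          if PySem.List.pyGetD best (b : Int) 0 < D bit (b : Int)
          then best.set ((b : Int)).toNat (D bit (b : Int)) else best) best) c)).getD j 0
        = bits.foldl (fun a bit => max a (D bit (j : Int))) (c.getD j 0) := by
  intro bits
  induction bits with
  | nil => intro c j h1 h2; simp
  | cons bit bits ih =>
    intro c j h1 h2
    rw [List.foldl_cons, List.foldl_cons]
    have hlen := pv_max_len (D bit) M c
    rw [ih _ j h1 (by omega)]
    rw [pv_maxLoop (D bit) M c j, if_pos ⟨h1, h2⟩]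

lemma pv_bit_len (D : Int → Int → Int) (M : Nat) :
    ∀ (bits : List Int) (c : List Int),
      ((bits.foldl (fun best (bit : Int) => (List.range M).foldl (fun best (b : Nat) =>
          if PySem.List.pyGetD best (b : Int) 0 < D bit (b : Int)
          then best.set ((b : Int)).toNat (D bit (b : Int)) else best) best) c)).length = c.length :=
  fun bits c => pv_foldl_len _ (fun c' bit => pv_max_len (D bit) M c') bits c

lemma pv_foldl_max_le : ∀ (l : List Int) (a v : Int), a ≤ v → (∀ y ∈ l, y ≤ v) → l.foldl max a ≤ v := by
  intro l
  induction l with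
  | nil => intro a v h _; simpa using h
  | cons x xs ih =>
    intro a v ha hy
    rw [List.foldl_cons]
    exact ih _ v (max_le ha (hy x List.mem_cons_self)) (fun y h => hy y (List.mem_cons_of_mem _ h))

lemma pv_max?_some (l : List Int) (h : l ≠ []) : ∃ w, PySem.List.max? l (fun v => v) = some w := by
  cases hm : PySem.List.max? l (fun v => v) with
  | none => exact absurd ((PySem.List.max?_eq_none_iff l (fun v => v)).mp hm) h
  | some w => exact ⟨w, rfl⟩

lemma pv_maxD (l : List Int) (h1 : l ≠ []) (h2 : ∀ y ∈ l, 0 ≤ y) :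
    (PySem.List.max? l (fun v => v)).getD 0 = l.foldl max 0 := by
  obtain ⟨w, hw⟩ := pv_max?_some l h1
  have hmem : w ∈ l := PySem.List.max?_mem hw
  have hmax : ∀ y ∈ l, y ≤ w := PySem.List.max?_isMax hw
  rw [hw, Option.getD_some]
  exact le_antisymm ((PySem.List.le_foldl_max l 0).2 w hmem)
    (pv_foldl_max_le l 0 w (h2 w hmem) hmax)


lemma pv_foldl_count {α : Type} (p : α → Prop) [DecidablePred p] :
    ∀ (l : List α) (a : Nat),
      l.foldl (fun s x => if p x then s + 1 else s) a = a + l.countP (fun x => decide (p x)) := by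
  intro l
  induction l with
  | nil => intro a; simp
  | cons x xs ih =>
    intro a
    rw [List.foldl_cons, ih, List.countP_cons]
    by_cases hp : p x <;> simp [hp] <;> omega

lemma pv_toNat_sub (M bn : Nat) (h : bn < M) : ((M : Int) - 1 - (bn : Int)).toNat = M - 1 - bn := by
  omega

lemma pv_cnt_eqA (sbox : List Int) (N M : Nat) (bn bitn : Nat) (hbn : bn < M) (hbit : bitn < N) :
    (PySem.List.pyRange 0 ((2 ^ N : Nat) : Int)).countP (fun x => decide
      (PySem.Int.bxor
        (PySem.List.pyGetD (List.map (fun x => PySem.Int.band (PySem.List.pyGetD sbox x 0 >>> ((M : Int) - 1 - (bn : Int)).toNat) 1) (PySem.List.pyRange 0 ((2 ^ N : Nat) : Int))) x 0)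
        (PySem.List.pyGetD (List.map (fun x => PySem.Int.band (PySem.List.pyGetD sbox x 0 >>> ((M : Int) - 1 - (bn : Int)).toNat) 1) (PySem.List.pyRange 0 ((2 ^ N : Nat) : Int)))
          (PySem.Int.bxor x ((2 ^ (((N : Int) - 1 - (bitn : Int)).toNat) : Nat) : Int)) 0) ≠ 0))
    = (List.range (2 ^ N)).countP (fun (xn : Nat) => pvD sbox (M - 1 - bn) ((2 ^ (N - 1 - bitn) : Nat) : Int) (xn : Int)) := by
  rw [pvRange_natCast (2 ^ N), List.countP_map]
  apply List.countP_congr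
  intro xn hx
  rw [List.mem_range] at hx
  have hk : ((M : Int) - 1 - (bn : Int)).toNat = M - 1 - bn := pv_toNat_sub M bn hbn
  have hj : ((N : Int) - 1 - (bitn : Int)).toNat = N - 1 - bitn := pv_toNat_sub N bitn hbit
  have hmask : 2 ^ (N - 1 - bitn) < 2 ^ N := Nat.pow_lt_pow_right (by omega) (by omega)
  have hx2 : xn ^^^ 2 ^ (N - 1 - bitn) < 2 ^ N := Nat.xor_lt_two_pow hx hmask
  simp only [Function.comp_apply, hk, hj]
  rw [show PySem.Int.bxor (xn : Int) ((2 ^ (N - 1 - bitn) : Nat) : Int) = ((xn ^^^ 2 ^ (N - 1 - bitn) : Nat) : Int) from PySem.Int.bxor_natCast xn (2 ^ (N - 1 - bitn))]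
  simp only [List.map_map]
  rw [PySem.List.pyGetD_natCast, PySem.List.pyGetD_natCast]
  rw [List.getD_eq_getElem _ _ (by simpa using hx), List.getD_eq_getElem _ _ (by simpa using hx2)]
  simp only [List.getElem_map, List.getElem_range, Function.comp_apply]
  rw [decide_eq_true_eq, pv_condA]
  simp only [pvD, PySem.Int.bxor_natCast]

lemma pv_A_eq (sbox : List Int) (N M : Nat) (hN : 1 ≤ N) :
    sac_distance sbox (N : Int) (M : Int) = (List.range M).map (pvVal sbox N M) := by
  unfold sac_distance pvComponentTT
  simp only [PySem.List.foldl_append_singleton_eq_map, List.nil_append, Int.toNat_natCast, pv_shl]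
  rw [pvRange_natCast M, List.map_map, List.map_map]
  apply List.map_congr_left
  intro bn hbn
  rw [List.mem_range] at hbn
  simp only [Function.comp_apply]
  rw [pv_maxD _ (by simp [pvRange_natCast]; omega)
      (by intro y hy; obtain ⟨w, -, rfl⟩ := List.mem_map.mp hy; positivity)]
  rw [pvRange_natCast N, List.map_map, List.foldl_map]
  unfold pvVal
  apply PySem.List.foldl_congr_mem
  intro acc bitn hbit
  rw [List.mem_range] at hbit
  simp only [Function.comp_apply]
  congr 1
  unfold pvDev
  rw [pv_foldl_count, pv_cnt_eqA sbox N M bn bitn hbn hbit]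
  simp only [Nat.zero_add, pvCnt]
  rfl


lemma pv_cnt_eqB (sbox : List Int) (N M : Nat) (bitn j : Nat) (hj : j < M) (hbit : bitn < N) :
    (List.range (2 ^ N)).countP (fun (xn : Nat) => decide
      (PySem.Int.band (PySem.Int.bxor (PySem.List.pyGetD sbox (xn : Int) 0)
          (PySem.List.pyGetD sbox (PySem.Int.bxor (xn : Int) ((2 ^ (((N : Int) - 1 - (bitn : Int)).toNat) : Nat) : Int)) 0) >>>
        ((M : Int) - 1 - (j : Int)).toNat) 1 ≠ 0))
    = (List.range (2 ^ N)).countP (fun (xn : Nat) => pvD sbox (M - 1 - j) ((2 ^ (N - 1 - bitn) : Nat) : Int) (xn : Int)) := by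
  apply List.countP_congr
  intro xn _
  rw [pv_toNat_sub M j hj, pv_toNat_sub N bitn hbit]
  rw [decide_eq_true_eq, pv_condB]
  simp only [pvD]

lemma pv_B_eq (sbox : List Int) (N M : Nat) (hM : 1 ≤ M) :
    sac_distance_alt sbox (N : Int) (M : Int) = (List.range M).map (pvVal sbox N M) := by
  unfold sac_distance_alt
  simp only [Int.toNat_natCast, pv_shl]
  rw [if_neg (by omega : ¬ (M : Int) ≤ 0)]
  simp only [pvRange_natCast M, List.foldl_map]
  have hlen := pv_bit_len (fun (bit b : Int) =>
    |PySem.List.pyGetD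
       ((PySem.List.pyRange 0 ((2 ^ N : Nat) : Int)).foldl (fun cnt x =>
          (List.range M).foldl (fun cnt (q : Nat) =>
            if PySem.Int.band (PySem.Int.bxor (PySem.List.pyGetD sbox x 0)
                 (PySem.List.pyGetD sbox (PySem.Int.bxor x ((2 ^ (((N : Int) - 1 - bit).toNat) : Nat) : Int)) 0) >>>
                 (((M : Int) - 1 - ((q : Nat) : Int)).toNat)) 1 ≠ 0
            then cnt.set (((q : Nat) : Int)).toNat (PySem.List.pyGetD cnt ((q : Nat) : Int) 0 + 1) else cnt) cnt)
          (List.replicate M (0 : Int)))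
       b 0 - (((2 ^ N : Nat) : Int)) >>> 1|) M (PySem.List.pyRange 0 ((N : Nat) : Int)) (List.replicate M 0)
  simp only [] at hlen
  apply List.ext_getElem
  · rw [hlen]; simp
  · intro j hj hj2
    have hjM : j < M := by simpa using hj2
    rw [show (List.map (pvVal sbox N M) (List.range M))[j]'hj2 = pvVal sbox N M j by simp]
    rw [← List.getD_eq_getElem _ 0 hj]
    have hval := pv_bitLoop (fun (bit b : Int) =>
    |PySem.List.pyGetD
       ((PySem.List.pyRange 0 ((2 ^ N : Nat) : Int)).foldl (fun cnt x =>
          (List.range M).foldl (fun cnt (q : Nat) =>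
            if PySem.Int.band (PySem.Int.bxor (PySem.List.pyGetD sbox x 0)
                 (PySem.List.pyGetD sbox (PySem.Int.bxor x ((2 ^ (((N : Int) - 1 - bit).toNat) : Nat) : Int)) 0) >>>
                 (((M : Int) - 1 - ((q : Nat) : Int)).toNat)) 1 ≠ 0
            then cnt.set (((q : Nat) : Int)).toNat (PySem.List.pyGetD cnt ((q : Nat) : Int) 0 + 1) else cnt) cnt)
          (List.replicate M (0 : Int)))
       b 0 - (((2 ^ N : Nat) : Int)) >>> 1|) M (PySem.List.pyRange 0 ((N : Nat) : Int))
      (List.replicate M 0) j hjM (by simp [hjM])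
    simp only [] at hval
    rw [hval]
    rw [show (List.replicate M (0 : Int)).getD j 0 = 0 by simp [List.getD_eq_getElem?_getD, hjM]]
    rw [pvRange_natCast N, List.foldl_map]
    unfold pvVal
    apply PySem.List.foldl_congr_mem
    intro acc bitn hbit
    rw [List.mem_range] at hbit
    congr 1
    have hx := pv_xLoop (fun (x b : Int) =>
        PySem.Int.band (PySem.Int.bxor (PySem.List.pyGetD sbox x 0)
          (PySem.List.pyGetD sbox (PySem.Int.bxor x ((2 ^ (((N : Int) - 1 - ((bitn : Nat) : Int)).toNat) : Nat) : Int)) 0) >>>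
          (((M : Int) - 1 - b).toNat)) 1 ≠ 0) M
      (PySem.List.pyRange 0 ((2 ^ N : Nat) : Int)) (List.replicate M 0) j hjM (by simp [hjM])
    simp only [] at hx
    rw [PySem.List.pyGetD_natCast] at *
    rw [hx]
    rw [show (List.replicate M (0 : Int)).getD j 0 = 0 by simp [List.getD_eq_getElem?_getD, hjM]]
    rw [pvRange_natCast (2 ^ N), List.countP_map]
    simp only [Function.comp_def]
    rw [pv_cnt_eqB sbox N M bitn j hjM hbit]
    unfold pvDev pvCnt
    simp only [zero_add]
    rfl

-- ===== VERDICT (by name: the statement is the Claim_ definition above) =====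
theorem sac_distance_spec : Claim_equal_sac_distance := by
  intro sbox n m _ hpre
  obtain ⟨hn0, himp⟩ := hpre
  unfold Spec_sac_distance
  by_cases hm : m ≤ 0
  · unfold sac_distance sac_distance_alt pvComponentTT
    simp only [PySem.List.pyRange_one_eq_nil hm]
    simp [hm]
  · have hm1 : 1 ≤ m := by omega
    obtain ⟨hn1, hlen⟩ := himp hm1
    obtain ⟨N, rfl⟩ : ∃ N : Nat, n = (N : Int) := ⟨n.toNat, (Int.toNat_of_nonneg hn0).symm⟩
    obtain ⟨M, rfl⟩ : ∃ M : Nat, m = (M : Int) := ⟨m.toNat, (Int.toNat_of_nonneg (by omega)).symm⟩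
    have hN : 1 ≤ N := by exact_mod_cast hn1
    have hM : 1 ≤ M := by exact_mod_cast hm1
    rw [pv_A_eq sbox N M hN, pv_B_eq sbox N M hM]
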